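-- pv_equiv track=rewrite | github.com/shandrayu/aoc-2020 | day09/python/day09.py | is_number_valid
-- ===== SOURCE A (Python) =====
-- from typing import Deque
--
-- def is_number_valid(number: int, preamble: Deque[int]) -> bool:
--     is_valid = False
--     for preabmle_num in preamble:
--         difference = number - preabmle_num
--         if difference in preamble and difference != preabmle_num:
--             is_valid = True
--             break
--     return is_valid
-- ===== SOURCE B (Python) =====
-- def is_number_valid(number, preamble):
--     arr = sorted(preamble)
--     i, j = 0, len(arr) - 1
--     while i < j:
--         s = arr[i] + arr[j]
--         if s == number:
--             if arr[i] != arr[j]: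
--                 return True
--             i += 1
--         elif s < number:
--             i += 1
--         else:
--             j -= 1
--     return False
-- ===== Notes on version B (the rewrite author's own statement) =====
-- stated objective: alternative
-- what changed: Replaced the scan with a linear 'difference in preamble' membership test inside it by a sort-then-two-pointer search over a sorted copy, guarding against equal-valued pairs.
import Mathlib
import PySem

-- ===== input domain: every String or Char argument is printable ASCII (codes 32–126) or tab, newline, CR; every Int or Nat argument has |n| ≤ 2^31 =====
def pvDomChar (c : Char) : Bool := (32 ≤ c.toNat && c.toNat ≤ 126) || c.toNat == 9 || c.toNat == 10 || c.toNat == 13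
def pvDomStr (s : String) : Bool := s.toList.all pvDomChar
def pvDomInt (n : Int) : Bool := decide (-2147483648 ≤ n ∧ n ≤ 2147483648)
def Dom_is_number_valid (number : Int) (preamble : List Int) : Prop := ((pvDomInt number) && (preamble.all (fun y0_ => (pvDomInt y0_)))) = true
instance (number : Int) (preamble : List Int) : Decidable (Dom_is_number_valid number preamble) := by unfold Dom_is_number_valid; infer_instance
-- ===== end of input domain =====

-- B replaces A's scan with an inner linear membership test by a sort-then-two-pointer search (alternative algorithm, same return value).

-- ===== PORT A =====
-- A's for-loop with the is_valid flag and `break`: stop at the first element whose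
-- difference is a member of the preamble distinct from it
def isnvLoopA (number : Int) (preamble : List Int) : List Int → Bool
  | [] => false
  | x :: rest =>
      let difference := number - x
      if preamble.contains difference && difference != x then true
      else isnvLoopA number preamble rest

def is_number_valid (number : Int) (preamble : List Int) : Bool :=
  isnvLoopA number preamble preamble

-- ===== PORT B =====
-- the `while i < j` loop of Source B, working on the sorted copy
def isnvTwoPtr (number : Int) (arr : List Int) (i j : Nat) : Bool :=
  if _h : i < j then
    let s := arr.getD i 0 + arr.getD j 0
    if s = number then
      if arr.getD i 0 ≠ arr.getD j 0 then true
      else isnvTwoPtr number arr (i + 1) j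
    else if s < number then isnvTwoPtr number arr (i + 1) j
    else isnvTwoPtr number arr i (j - 1)
  else false
termination_by j - i

def is_number_valid_alt (number : Int) (preamble : List Int) : Bool :=
  let arr := PySem.List.sorted preamble (fun x => x) false
  isnvTwoPtr number arr 0 (arr.length - 1)

-- ===== PRECONDITION & SPEC =====
def Spec_is_number_valid (number : Int) (preamble : List Int) (out : Bool) : Prop := out = is_number_valid_alt number preamble
instance (number : Int) (preamble : List Int) (out : Bool) : Decidable (Spec_is_number_valid number preamble out) := by unfold Spec_is_number_valid; infer_instance

-- ===== CLAIM (what is proved, stated in full; the proofs are below) =====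
def Claim_equal_is_number_valid : Prop := ∀ (number : Int) (preamble : List Int), Dom_is_number_valid number preamble → Spec_is_number_valid number preamble (is_number_valid number preamble)

-- ===== LEMMAS AND PROOFS =====

-- the common characterisation: two distinct values of the list summing to `number`
def isnvHasPair (number : Int) (l : List Int) : Prop :=
  ∃ a ∈ l, ∃ b ∈ l, a + b = number ∧ a ≠ b

theorem isnvLoopA_iff (number : Int) (preamble l : List Int) :
    isnvLoopA number preamble l = true ↔
      ∃ x ∈ l, (number - x) ∈ preamble ∧ number - x ≠ x := by
  induction l with
  | nil => simp [isnvLoopA]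
  | cons x rest ih =>
    simp only [isnvLoopA, List.mem_cons]
    cases hc : (preamble.contains (number - x) && (number - x) != x) with
    | true =>
      simp only [if_true, true_iff]
      simp only [Bool.and_eq_true, List.contains_eq_mem, decide_eq_true_eq, bne_iff_ne] at hc
      exact ⟨x, Or.inl rfl, hc.1, hc.2⟩
    | false =>
      simp only [Bool.false_eq_true, if_false, ih]
      constructor
      · rintro ⟨y, hy, hm, hne⟩; exact ⟨y, Or.inr hy, hm, hne⟩
      · rintro ⟨y, hy, hm, hne⟩
        rcases hy with rfl | hy
        · exfalso
          have : (preamble.contains (number - y) && (number - y) != y) = true := by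
            simp [List.contains_eq_mem, hm, bne_iff_ne, hne]
          rw [hc] at this; exact Bool.false_ne_true this
        · exact ⟨y, hy, hm, hne⟩

theorem isnvA_iff (number : Int) (preamble : List Int) :
    is_number_valid number preamble = true ↔ isnvHasPair number preamble := by
  rw [is_number_valid, isnvLoopA_iff]
  constructor
  · rintro ⟨x, hx, hm, hne⟩
    exact ⟨x, hx, number - x, hm, by ring, fun h => hne h.symm⟩
  · rintro ⟨a, ha, b, hb, hab, hne⟩
    refine ⟨a, ha, ?_, ?_⟩
    · have : number - a = b := by omega
      rw [this]; exact hb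
    · intro h; apply hne; omega

-- two-pointer correctness on a sorted list: fuel induction on j - i
theorem isnvTwoPtr_iff (number : Int) (arr : List Int)
    (hsort : arr.Pairwise (· ≤ ·)) :
    ∀ (k i j : Nat), j - i = k → j < arr.length →
    (isnvTwoPtr number arr i j = true ↔
      ∃ p q, i ≤ p ∧ p < q ∧ q ≤ j ∧
        arr.getD p 0 + arr.getD q 0 = number ∧ arr.getD p 0 ≠ arr.getD q 0) := by
  have mono : ∀ p q : Nat, p ≤ q → q < arr.length → arr.getD p 0 ≤ arr.getD q 0 := by
    intro p q hpq hq
    rcases Nat.eq_or_lt_of_le hpq with rfl | hlt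
    · exact le_refl _
    · have hp : p < arr.length := lt_trans hlt hq
      have := (List.pairwise_iff_getElem.mp hsort) p q hp hq hlt
      simpa [List.getD_eq_getElem?_getD, List.getElem?_eq_getElem, hp, hq] using this
  intro k
  induction k with
  | zero =>
    intro i j hk hj
    have hij : ¬ i < j := by omega
    rw [isnvTwoPtr, dif_neg hij]
    simp only [Bool.false_eq_true, false_iff]
    rintro ⟨p, q, hip, hpq, hqj, -, -⟩
    omega
  | succ k ih =>
    intro i j hk hj
    have hij : i < j := by omega
    rw [isnvTwoPtr, dif_pos hij]
    by_cases hs0 : arr.getD i 0 + arr.getD j 0 = number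
    · rw [if_pos hs0]
      by_cases hne : arr.getD i 0 ≠ arr.getD j 0
      · rw [if_pos hne]
        simp only [true_iff]
        exact ⟨i, j, le_refl _, hij, le_refl _, hs0, hne⟩
      · rw [if_neg hne]
        push_neg at hne
        rw [ih (i + 1) j (by omega) hj]
        constructor
        · rintro ⟨p, q, hip, hpq, hqj, hsum, hpair⟩
          exact ⟨p, q, by omega, hpq, hqj, hsum, hpair⟩
        · rintro ⟨p, q, hip, hpq, hqj, hsum, hpair⟩
          rcases Nat.lt_or_ge i p with hip' | hip'
          · exact ⟨p, q, hip', hpq, hqj, hsum, hpair⟩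
          · exfalso
            have hpi : p = i := by omega
            subst hpi
            have h1 := mono p q (by omega) (by omega)
            have h2 := mono q j hqj hj
            exact hpair (by omega)
    · rw [if_neg hs0]
      by_cases hlt : arr.getD i 0 + arr.getD j 0 < number
      · rw [if_pos hlt, ih (i + 1) j (by omega) hj]
        constructor
        · rintro ⟨p, q, hip, hpq, hqj, hsum, hpair⟩
          exact ⟨p, q, by omega, hpq, hqj, hsum, hpair⟩
        · rintro ⟨p, q, hip, hpq, hqj, hsum, hpair⟩
          rcases Nat.lt_or_ge i p with hip' | hip'
          · exact ⟨p, q, hip', hpq, hqj, hsum, hpair⟩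
          · exfalso
            have hpi : p = i := by omega
            subst hpi
            have h2 := mono q j hqj hj
            omega
      · rw [if_neg hlt, ih i (j - 1) (by omega) (by omega)]
        constructor
        · rintro ⟨p, q, hip, hpq, hqj, hsum, hpair⟩
          exact ⟨p, q, hip, hpq, by omega, hsum, hpair⟩
        · rintro ⟨p, q, hip, hpq, hqj, hsum, hpair⟩
          rcases Nat.lt_or_ge q j with hqj' | hqj'
          · exact ⟨p, q, hip, hpq, by omega, hsum, hpair⟩
          · exfalso
            have hqj2 : q = j := by omega
            subst hqj2
            have h1 := mono p q (by omega) hj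
            have h2 := mono i p (by omega) (by omega)
            omega

theorem isnvB_iff (number : Int) (preamble : List Int) :
    is_number_valid_alt number preamble = true ↔ isnvHasPair number preamble := by
  rw [is_number_valid_alt]
  set arr := PySem.List.sorted preamble (fun x => x) false with harr
  have hperm : arr.Perm preamble := PySem.List.sorted_perm preamble (fun x => x) false
  have hpw : arr.Pairwise (· ≤ ·) := by
    have := PySem.List.sorted_pairwise (xs := preamble) (key := fun x => x)
    simpa using this
  by_cases hnil : arr = []
  · rw [hnil]
    have hp : preamble = [] := (List.Perm.nil_eq (hnil ▸ hperm)).symm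
    rw [hp]
    simp [isnvTwoPtr, isnvHasPair]
  · have hlen : 0 < arr.length := List.length_pos_of_ne_nil hnil
    rw [isnvTwoPtr_iff number arr hpw (arr.length - 1 - 0) 0 (arr.length - 1) rfl (by omega)]
    constructor
    · rintro ⟨p, q, -, hpq, hqj, hsum, hne⟩
      have hq : q < arr.length := by omega
      have hp : p < arr.length := by omega
      refine ⟨arr.getD p 0, ?_, arr.getD q 0, ?_, hsum, hne⟩
      · rw [← hperm.mem_iff]
        rw [List.getD_eq_getElem?_getD, List.getElem?_eq_getElem hp]
        exact List.getElem_mem hp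
      · rw [← hperm.mem_iff]
        rw [List.getD_eq_getElem?_getD, List.getElem?_eq_getElem hq]
        exact List.getElem_mem hq
    · rintro ⟨a, ha, b, hb, hab, hne⟩
      have ha' : a ∈ arr := hperm.mem_iff.mpr ha
      have hb' : b ∈ arr := hperm.mem_iff.mpr hb
      obtain ⟨p, hp, hpa⟩ := List.getElem_of_mem ha'
      obtain ⟨q, hq, hqb⟩ := List.getElem_of_mem hb'
      have hpqne : p ≠ q := by
        intro h; subst h; exact hne (hpa.symm.trans hqb)
      have hga : arr.getD p 0 = a := by
        rw [List.getD_eq_getElem?_getD, List.getElem?_eq_getElem hp]; exact hpa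
      have hgb : arr.getD q 0 = b := by
        rw [List.getD_eq_getElem?_getD, List.getElem?_eq_getElem hq]; exact hqb
      rcases Nat.lt_or_ge p q with hlt | hge
      · exact ⟨p, q, Nat.zero_le _, hlt, by omega, by rw [hga, hgb]; exact hab,
          by rw [hga, hgb]; exact hne⟩
      · have hlt : q < p := lt_of_le_of_ne hge (Ne.symm hpqne)
        exact ⟨q, p, Nat.zero_le _, hlt, by omega, by rw [hga, hgb]; omega,
          by rw [hga, hgb]; exact fun h => hne h.symm⟩

-- ===== VERDICT (by name: the statement is the Claim_ definition above) =====
theorem is_number_valid_spec : Claim_equal_is_number_valid := by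
  intro number preamble _
  unfold Spec_is_number_valid
  cases hB : is_number_valid_alt number preamble with
  | true =>
    exact (isnvA_iff number preamble).mpr ((isnvB_iff number preamble).mp hB)
  | false =>
    cases hA : is_number_valid number preamble with
    | false => rfl
    | true =>
      exfalso
      have := (isnvB_iff number preamble).mpr ((isnvA_iff number preamble).mp hA)
      rw [hB] at this; exact Bool.false_ne_true this
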